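-- pv_equiv track=rewrite | github.com/umutakturk01/data_com_project | client2_receiver.py | calculate_2d_parity
-- ===== SOURCE A (Python) =====
-- def calculate_2d_parity(data):
--     binary_data = ''.join(format(ord(c), '08b') for c in data)
--     rows = []
--     for i in range(0, len(binary_data), 8):
--         row = binary_data[i:i+8].ljust(8, '0')
--         rows.append(row)
--
--     row_parities = [str(row.count('1') % 2) for row in rows]
--     col_parities = []
--     for col in range(8):
--         col_sum = sum(int(row[col]) for row in rows if col < len(row))
--         col_parities.append(str(col_sum % 2))
--
--     return ''.join(row_parities) + ''.join(col_parities)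
-- ===== SOURCE B (Python) =====
-- def calculate_2d_parity(data):
--     # Single pass over the characters: per-char popcount parity gives the row
--     # parities; XOR-folding the char codes gives all 8 column parities at once.
--     row_parities = []
--     acc = 0
--     for c in data:
--         v = ord(c)
--         row_parities.append(str(bin(v).count('1') % 2))
--         acc ^= v
--     return ''.join(row_parities) + format(acc, '08b')
-- ===== Notes on version B (the rewrite author's own statement) =====
-- stated objective: faster
-- what changed: B makes one pass over the characters, taking each row parity from the char code's popcount and computing all 8 column parities at once by XOR-folding the char codes, instead of building an intermediate bit-string, chunking it, and scanning all rows once per column.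
import Mathlib
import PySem

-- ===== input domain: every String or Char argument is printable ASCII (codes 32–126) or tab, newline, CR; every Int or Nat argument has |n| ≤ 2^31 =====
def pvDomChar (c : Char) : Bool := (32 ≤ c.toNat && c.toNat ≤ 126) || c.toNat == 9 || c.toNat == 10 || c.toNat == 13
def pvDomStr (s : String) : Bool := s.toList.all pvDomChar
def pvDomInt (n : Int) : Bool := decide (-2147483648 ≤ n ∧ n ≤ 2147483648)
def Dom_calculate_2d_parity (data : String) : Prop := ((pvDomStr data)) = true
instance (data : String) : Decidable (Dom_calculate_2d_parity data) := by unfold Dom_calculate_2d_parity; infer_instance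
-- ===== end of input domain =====

-- B replaces A's bit-string build + per-column rescans by one pass: popcount per char for
-- the row parities and an XOR-fold of the char codes for all 8 column parities at once.

-- ===== PORT A =====
-- Python bin(n) digit list (most significant first), via repeated divmod; the first
-- argument is fuel (n halves to 0 within n steps, so fuel n is always enough)
def natToBinAux : Nat → Nat → List Char → List Char
  | 0, _, acc => acc
  | fuel+1, n, acc =>
    if n = 0 then acc else natToBinAux fuel (n / 2) ((if n % 2 = 1 then '1' else '0') :: acc)

-- digits of bin(n); bin(0) = "0"
def natToBin (n : Nat) : List Char := if n = 0 then ['0'] else natToBinAux n n []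

-- format(n, '08b'): binary digits left-padded with '0' to at least width 8 (exact for n ≥ 0)
def fmt08 (n : Nat) : List Char := List.replicate (8 - (natToBin n).length) '0' ++ natToBin n

-- row.ljust(8, '0')
def ljust8 (row : List Char) : List Char := row ++ List.replicate (8 - row.length) '0'

-- the `for i in range(0, len(binary_data), 8)` loop: successive 8-slices, each ljust-ed
def chunkRows : List Char → List (List Char)
  | [] => []
  | c :: rest => ljust8 ((c :: rest).take 8) :: chunkRows ((c :: rest).drop 8)
  termination_by l => l.length
  decreasing_by simp

-- int(c) for the digit chars '0'/'1' that occur in rows (exact there)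
def digitVal (c : Char) : Nat := c.toNat - 48

def calculate_2d_parity (data : String) : String :=
  let binary_data := (data.toList.map (fun c => fmt08 c.toNat)).flatten
  let rows := chunkRows binary_data
  let row_parities := rows.map (fun row => if row.count '1' % 2 = 1 then '1' else '0')
  let col_parities := (List.range 8).map (fun col =>
    let col_sum := rows.foldl (fun s row => if col < row.length then s + digitVal (row.getD col '0') else s) 0
    if col_sum % 2 = 1 then '1' else '0')
  String.mk (row_parities ++ col_parities)

-- ===== PORT B =====
def calculate_2d_parity_alt (data : String) : String :=
  let st := data.toList.foldl
    (fun (st : List Char × Nat) c =>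
      (st.1 ++ [if (natToBin c.toNat).count '1' % 2 = 1 then '1' else '0'], st.2 ^^^ c.toNat))
    ([], 0)
  String.mk (st.1 ++ fmt08 st.2)

-- ===== PRECONDITION & SPEC =====
def Spec_calculate_2d_parity (data : String) (out : String) : Prop := out = calculate_2d_parity_alt data
instance (data : String) (out : String) : Decidable (Spec_calculate_2d_parity data out) := by unfold Spec_calculate_2d_parity; infer_instance

-- ===== CLAIM (what is proved, stated in full; the proofs are below) =====
def Claim_equal_calculate_2d_parity : Prop := ∀ (data : String), Dom_calculate_2d_parity data → Spec_calculate_2d_parity data (calculate_2d_parity data)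

-- ===== LEMMAS AND PROOFS =====

-- fmt08 on a byte is exactly its 8 bits, MSB first
set_option maxRecDepth 8000 in
theorem fmt08_bits : ∀ v : Fin 256,
    fmt08 v.val = (List.range 8).map (fun col => if v.val.testBit (7 - col) then '1' else '0') := by
  decide

theorem fmt08_bits' (v : Nat) (h : v < 256) :
    fmt08 v = (List.range 8).map (fun col => if v.testBit (7 - col) then '1' else '0') :=
  fmt08_bits ⟨v, h⟩

theorem fmt08_length (v : Nat) (h : v < 256) : (fmt08 v).length = 8 := by
  rw [fmt08_bits' v h]; simp

-- the chunking loop recovers the 8-blocks of a concatenation of 8-blocks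
theorem chunk_flatten : ∀ bs : List (List Char), (∀ b ∈ bs, b.length = 8) →
    chunkRows bs.flatten = bs := by
  intro bs
  induction bs with
  | nil => intro _; rw [List.flatten_nil, chunkRows.eq_1]
  | cons b bs ih =>
    intro h
    have hb : b.length = 8 := h b (by simp)
    obtain ⟨c, t, rfl⟩ : ∃ c t, b = c :: t := by
      cases b with
      | nil => simp at hb
      | cons c t => exact ⟨c, t, rfl⟩
    have htake : ((c :: t) ++ bs.flatten).take 8 = c :: t := by
      rw [← hb, List.take_left]
    have hdrop : ((c :: t) ++ bs.flatten).drop 8 = bs.flatten := by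
      rw [← hb, List.drop_left]
    rw [List.flatten_cons, List.cons_append, chunkRows, ← List.cons_append, htake, hdrop]
    rw [ih (fun x hx => h x (by simp [hx]))]
    simp [ljust8, hb]

-- B's fold, characterised
theorem foldB (l : List Char) : ∀ (acc : List Char) (a : Nat),
    l.foldl (fun (st : List Char × Nat) c =>
      (st.1 ++ [if (natToBin c.toNat).count '1' % 2 = 1 then '1' else '0'], st.2 ^^^ c.toNat))
      (acc, a)
    = (acc ++ l.map (fun c => if (natToBin c.toNat).count '1' % 2 = 1 then '1' else '0'),
       l.foldl (fun a c => a ^^^ c.toNat) a) := by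
  induction l with
  | nil => intro acc a; simp
  | cons c l ih => intro acc a; simp [List.foldl_cons, ih]

-- fmt08 only adds '0's, so its '1'-count is bin's
theorem count_fmt08 (v : Nat) : (fmt08 v).count '1' = (natToBin v).count '1' := by
  simp [fmt08, List.count_append, List.count_replicate]

-- a bit of the XOR-fold is the parity of the per-element bits
theorem testBit_foldl_xor (k : Nat) (l : List Char) : ∀ (a : Nat),
    (l.foldl (fun a c => a ^^^ c.toNat) a).testBit k
      = xor (a.testBit k)
          (decide ((l.map (fun c => if c.toNat.testBit k then 1 else 0)).sum % 2 = 1)) := by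
  induction l with
  | nil => intro a; simp
  | cons c l ih =>
    intro a
    rw [List.foldl_cons, ih, Nat.testBit_xor]
    simp only [List.map_cons, List.sum_cons]
    by_cases hc : c.toNat.testBit k
    · simp only [hc, if_pos trivial]
      have : ((1 + (l.map (fun c => if c.toNat.testBit k then 1 else 0)).sum) % 2 = 1)
           ↔ ¬ ((l.map (fun c => if c.toNat.testBit k then 1 else 0)).sum % 2 = 1) := by omega
      rcases Bool.eq_false_or_eq_true (a.testBit k) with h | h <;>
        by_cases hs : (l.map (fun c => if c.toNat.testBit k then 1 else 0)).sum % 2 = 1 <;>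
          simp [h, hs, this]
    · simp [hc]

-- XOR of bytes stays a byte
theorem foldl_xor_lt (l : List Char) : ∀ (a : Nat), a < 256 → (∀ c ∈ l, c.toNat < 256) →
    (l.foldl (fun a c => a ^^^ c.toNat) a) < 256 := by
  induction l with
  | nil => intro a ha _; simpa using ha
  | cons c l ih =>
    intro a ha h
    rw [List.foldl_cons]
    exact ih _ (Nat.xor_lt_two_pow (n := 8) ha (h c (by simp))) (fun x hx => h x (by simp [hx]))

-- A's column sum over the byte rows = sum of the selected bits
theorem colsum_eq (col : Nat) (hcol : col < 8) (l : List Char) (hl : ∀ c ∈ l, c.toNat < 256) :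
    ∀ s : Nat,
    (l.map (fun c => fmt08 c.toNat)).foldl
        (fun s row => if col < row.length then s + digitVal (row.getD col '0') else s) s
      = s + (l.map (fun c => if c.toNat.testBit (7 - col) then 1 else 0)).sum := by
  induction l with
  | nil => intro s; simp
  | cons c l ih =>
    intro s
    have hc : c.toNat < 256 := hl c (by simp)
    have hlen : (fmt08 c.toNat).length = 8 := fmt08_length _ hc
    have hget : (fmt08 c.toNat).getD col '0'
        = (if c.toNat.testBit (7 - col) then '1' else '0') := by
      rw [fmt08_bits' _ hc, List.getD_eq_getElem?_getD]
      simp [hcol]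
    simp only [List.map_cons, List.foldl_cons, List.sum_cons, hlen, hcol, if_pos, hget]
    rw [ih (fun x hx => hl x (by simp [hx]))]
    by_cases hb : c.toNat.testBit (7 - col) <;> simp [hb, digitVal] <;> omega -- parity arithmetic

-- Dom gives: every char code is a byte
theorem dom_bytes (data : String) (h : Dom_calculate_2d_parity data) :
    ∀ c ∈ data.toList, c.toNat < 256 := by
  intro c hc
  have := (List.all_eq_true.mp h) c hc
  simp only [pvDomChar, Bool.or_eq_true, Bool.and_eq_true, decide_eq_true_eq, beq_iff_eq] at this
  omega

-- ===== VERDICT (by name: the statement is the Claim_ definition above) =====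
theorem calculate_2d_parity_spec : Claim_equal_calculate_2d_parity := by
  intro data hdom
  have hl : ∀ c ∈ data.toList, c.toNat < 256 := dom_bytes data hdom
  unfold Spec_calculate_2d_parity calculate_2d_parity calculate_2d_parity_alt
  simp only [foldB, List.nil_append]
  have hrows : chunkRows ((data.toList.map (fun c => fmt08 c.toNat)).flatten)
      = data.toList.map (fun c => fmt08 c.toNat) := by
    apply chunk_flatten
    intro b hb
    obtain ⟨c, hc, rfl⟩ := List.mem_map.mp hb
    exact fmt08_length _ (hl c hc)
  rw [hrows]
  apply congrArg String.mk
  congr 1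
  · -- row parities agree
    rw [List.map_map]
    exact List.map_congr_left (fun c _ => by simp [Function.comp, count_fmt08])
  · -- column parities = bits of the XOR fold
    have hx : data.toList.foldl (fun a c => a ^^^ c.toNat) 0 < 256 :=
      foldl_xor_lt data.toList 0 (by norm_num) hl
    rw [fmt08_bits' _ hx]
    apply List.map_congr_left
    intro col hcol
    have hcol8 : col < 8 := List.mem_range.mp hcol
    rw [colsum_eq col hcol8 data.toList hl 0, testBit_foldl_xor]
    simp
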